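-- pv_equiv track=rewrite | github.com/davidspivak2/cue | app/ass_karaoke.py | _tokenize_word_tokens
-- ===== SOURCE A (Python) =====
-- from typing import Iterable, Optional, Sequence
--
-- def _tokenize_word_tokens(text: str) -> list[tuple[str, bool]]:
--     tokens: list[tuple[str, bool]] = []
--     if not text:
--         return tokens
--     current: list[str] = []
--     current_is_word: Optional[bool] = None
--     for char in text:
--         is_word = char.isalnum()
--         if current_is_word is None:
--             current_is_word = is_word
--             current.append(char)
--             continue
--         if is_word == current_is_word:
--             current.append(char)
--         else:
--             tokens.append(("".join(current), current_is_word))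
--             current = [char]
--             current_is_word = is_word
--     if current:
--         tokens.append(("".join(current), current_is_word if current_is_word is not None else False))
--     return tokens
-- ===== SOURCE B (Python) =====
-- def _tokenize_word_tokens(text: str) -> list[tuple[str, bool]]:
--     # Peel the leading run of same-kind characters off the front, repeatedly.
--     tokens: list[tuple[str, bool]] = []
--     rest = text
--     while rest:
--         k = rest[0].isalnum()
--         n = 1
--         while n < len(rest) and rest[n].isalnum() == k:
--             n += 1
--         tokens.append((rest[:n], k))
--         rest = rest[n:]
--     return tokens
-- ===== Notes on version B (the rewrite author's own statement) =====
-- stated objective: simpler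
-- what changed: Replaces the accumulate-and-flush state machine (current buffer + Optional current_is_word + final flush) by repeatedly peeling the maximal leading run off the remaining string, so there is no optional state and no flush logic.
import Mathlib
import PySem

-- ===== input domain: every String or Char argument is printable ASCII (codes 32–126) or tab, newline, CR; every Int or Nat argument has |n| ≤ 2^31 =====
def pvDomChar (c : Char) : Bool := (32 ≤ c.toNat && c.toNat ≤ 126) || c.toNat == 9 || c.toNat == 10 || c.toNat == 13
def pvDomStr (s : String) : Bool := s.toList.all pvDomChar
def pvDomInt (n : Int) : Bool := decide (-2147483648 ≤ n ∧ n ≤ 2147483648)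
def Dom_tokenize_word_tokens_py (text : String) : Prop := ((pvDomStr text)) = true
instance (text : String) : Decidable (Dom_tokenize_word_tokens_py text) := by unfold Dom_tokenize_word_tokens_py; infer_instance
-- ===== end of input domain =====

-- B peels maximal leading runs off the string instead of A's accumulate-and-flush
-- state machine; same return value, simpler decomposition (objective: simpler).


-- ===== PORT A =====
-- state: (tokens, current, current_is_word); one step per character, as in A's for-loop
def pvAStep (st : List (String × Bool) × List Char × Option Bool) (c : Char) :
    List (String × Bool) × List Char × Option Bool :=
  let is_word := PySem.Chars.isalnum c
  match st.2.2 with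
  | none => (st.1, st.2.1 ++ [c], some is_word)
  | some k =>
      if is_word == k then (st.1, st.2.1 ++ [c], some k)
      else (st.1 ++ [(String.ofList st.2.1, k)], [c], some is_word)

def tokenize_word_tokens_py (text : String) : List (String × Bool) :=
  if text.toList = [] then []
  else
    let st := text.toList.foldl pvAStep ([], [], none)
    if st.2.1 ≠ [] then st.1 ++ [(String.ofList st.2.1, st.2.2.getD false)] else st.1

-- ===== PORT B =====
-- peel the maximal leading run of characters of the head's kind, repeat on the rest
def pvBGo (cs : List Char) : List (String × Bool) :=
  match cs with
  | [] => []
  | c :: rest =>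
      let k := PySem.Chars.isalnum c
      (String.ofList (c :: rest.takeWhile (fun d => PySem.Chars.isalnum d == k)), k)
        :: pvBGo (rest.dropWhile (fun d => PySem.Chars.isalnum d == k))
termination_by cs.length
decreasing_by
  simpa using Nat.lt_succ_of_le (List.length_dropWhile_le _ _)

def tokenize_word_tokens_py_alt (text : String) : List (String × Bool) :=
  pvBGo text.toList

-- ===== PRECONDITION & SPEC =====
def Spec_tokenize_word_tokens_py (text : String) (out : List (String × Bool)) : Prop := out = tokenize_word_tokens_py_alt text
instance (text : String) (out : List (String × Bool)) : Decidable (Spec_tokenize_word_tokens_py text out) := by unfold Spec_tokenize_word_tokens_py; infer_instance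

-- ===== CLAIM (what is proved, stated in full; the proofs are below) =====
def Claim_equal_tokenize_word_tokens_py : Prop := ∀ (text : String), Dom_tokenize_word_tokens_py text → Spec_tokenize_word_tokens_py text (tokenize_word_tokens_py text)

-- ===== LEMMAS AND PROOFS =====

-- A's final flush, as an abbreviation for the proofs (definitionally the tail of port A)
def pvFlush (st : List (String × Bool) × List Char × Option Bool) : List (String × Bool) :=
  if st.2.1 ≠ [] then st.1 ++ [(String.ofList st.2.1, st.2.2.getD false)] else st.1

theorem pvBGo_cons (c : Char) (rest : List Char) :
    pvBGo (c :: rest) =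
      (String.ofList (c :: rest.takeWhile (fun d => PySem.Chars.isalnum d == PySem.Chars.isalnum c)),
        PySem.Chars.isalnum c)
        :: pvBGo (rest.dropWhile (fun d => PySem.Chars.isalnum d == PySem.Chars.isalnum c)) := by
  rw [pvBGo]

-- A's loop from a mid-run state (current = cur ≠ [], kind k), followed by the flush,
-- appends the merged first run and then B's tokens of the remainder.
theorem pvA_invariant (cs : List Char) :
    ∀ (toks : List (String × Bool)) (cur : List Char) (k : Bool), cur ≠ [] →
      pvFlush (cs.foldl pvAStep (toks, cur, some k)) =
      toks ++ (String.ofList (cur ++ cs.takeWhile (fun d => PySem.Chars.isalnum d == k)), k)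
        :: pvBGo (cs.dropWhile (fun d => PySem.Chars.isalnum d == k)) := by
  induction cs with
  | nil =>
      intro toks cur k hcur
      simp [pvFlush, pvBGo, hcur]
  | cons c rest ih =>
      intro toks cur k hcur
      by_cases h : PySem.Chars.isalnum c = k
      · have hstep : pvAStep (toks, cur, some k) c = (toks, cur ++ [c], some k) := by
          simp [pvAStep, h]
        rw [List.foldl_cons, hstep, ih toks (cur ++ [c]) k (by simp)]
        simp [h]
      · have hb : (PySem.Chars.isalnum c == k) = false := by simp [h]
        have hstep : pvAStep (toks, cur, some k) c =
            (toks ++ [(String.ofList cur, k)], [c], some (PySem.Chars.isalnum c)) := by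
          simp [pvAStep, hb]
        rw [List.foldl_cons, hstep,
          ih (toks ++ [(String.ofList cur, k)]) [c] (PySem.Chars.isalnum c) (by simp)]
        simp [hb, pvBGo_cons]

-- ===== VERDICT (by name: the statement is the Claim_ definition above) =====
theorem tokenize_word_tokens_py_spec : Claim_equal_tokenize_word_tokens_py := by
  intro text _
  unfold Spec_tokenize_word_tokens_py tokenize_word_tokens_py tokenize_word_tokens_py_alt
  cases h : text.toList with
  | nil => simp [pvBGo]
  | cons c rest =>
      rw [if_neg (by simp)]
      show pvFlush (List.foldl pvAStep ([], [], none) (c :: rest)) = _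
      have hstep : pvAStep ([], [], none) c = ([], [c], some (PySem.Chars.isalnum c)) := rfl
      rw [List.foldl_cons, hstep,
        pvA_invariant rest [] [c] (PySem.Chars.isalnum c) (by simp), pvBGo_cons]
      simp
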